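-- pv_equiv track=rewrite | github.com/tleub-ebp/WorkPilot-AI | apps/backend/release_coordinator/release_engine.py | determine_bump
-- ===== SOURCE A (Python) =====
-- from enum import Enum
--
-- class BumpType(str, Enum):
--     MAJOR = "major"
--     MINOR = "minor"
--     PATCH = "patch"
--     NONE = "none"
--
-- def determine_bump(commits: list[str]) -> BumpType:
--     """Determine version bump from conventional commit messages."""
--     has_breaking = any("!" in c.split(":")[0] or "BREAKING CHANGE" in c for c in commits)
--     has_feat = any(c.startswith("feat") for c in commits)
--     has_fix = any(c.startswith("fix") for c in commits)
--
--     if has_breaking: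
--         return BumpType.MAJOR
--     if has_feat:
--         return BumpType.MINOR
--     if has_fix:
--         return BumpType.PATCH
--     return BumpType.NONE
-- ===== SOURCE B (Python) =====
-- from enum import Enum
--
-- class BumpType(str, Enum):
--     MAJOR = "major"
--     MINOR = "minor"
--     PATCH = "patch"
--     NONE = "none"
--
-- _BY_RANK = (BumpType.NONE, BumpType.PATCH, BumpType.MINOR, BumpType.MAJOR)
--
-- def determine_bump(commits: list[str]) -> BumpType:
--     """Determine version bump from conventional commit messages (single pass, max severity rank)."""
--     rank = 0
--     for c in commits:
--         if "!" in c.split(":")[0] or "BREAKING CHANGE" in c: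
--             r = 3
--         elif c.startswith("feat"):
--             r = 2
--         elif c.startswith("fix"):
--             r = 1
--         else:
--             r = 0
--         if r > rank:
--             rank = r
--     return _BY_RANK[rank]
-- ===== Notes on version B (the rewrite author's own statement) =====
-- stated objective: alternative
-- what changed: Replaces A's three separate any-scans plus a priority if-chain with a single fold that maps each commit to a severity rank (breaking=3, feat=2, fix=1, else 0), keeps the running maximum, and maps the final rank back to the bump type.
import Mathlib
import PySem

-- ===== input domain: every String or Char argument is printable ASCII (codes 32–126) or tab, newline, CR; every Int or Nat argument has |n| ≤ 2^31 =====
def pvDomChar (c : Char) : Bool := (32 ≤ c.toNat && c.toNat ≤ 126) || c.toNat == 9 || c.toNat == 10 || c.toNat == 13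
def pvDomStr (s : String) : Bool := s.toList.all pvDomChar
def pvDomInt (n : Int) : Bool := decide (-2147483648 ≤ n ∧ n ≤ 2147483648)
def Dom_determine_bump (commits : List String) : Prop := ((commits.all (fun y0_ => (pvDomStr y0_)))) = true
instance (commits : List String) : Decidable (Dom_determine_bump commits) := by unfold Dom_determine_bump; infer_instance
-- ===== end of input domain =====

-- B replaces three priority-ordered any-scans with one fold keeping the maximum severity rank (alternative decomposition, same cost).
-- ===== PORT A =====
-- '"!" in c.split(":")[0] or "BREAKING CHANGE" in c'. split? with the nonempty separator ":" is never none and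
-- never returns an empty list, so the getD defaults are unreachable; pyGet? 0 is the Python [0].
def pvBreaking (c : String) : Bool :=
  PySem.Str.isIn "!" ((PySem.List.pyGet? ((PySem.Str.split? c ":").getD []) 0).getD "")
    || PySem.Str.isIn "BREAKING CHANGE" c

def determine_bump (commits : List String) : String :=
  let has_breaking := commits.any (fun c => pvBreaking c)
  let has_feat := commits.any (fun c => PySem.Str.startswith c "feat")
  let has_fix := commits.any (fun c => PySem.Str.startswith c "fix")
  if has_breaking then "major"
  else if has_feat then "minor"
  else if has_fix then "patch"
  else "none"

-- ===== PORT B =====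
-- severity rank of a single commit (B's if/elif chain; same predicates as A)
def pvRank (c : String) : Nat :=
  if pvBreaking c then 3
  else if PySem.Str.startswith c "feat" then 2
  else if PySem.Str.startswith c "fix" then 1
  else 0

def determine_bump_alt (commits : List String) : String :=
  let rank := commits.foldl (fun acc c => Nat.max acc (pvRank c)) 0
  ["none", "patch", "minor", "major"].getD rank "none"

-- ===== PRECONDITION & SPEC =====
def Spec_determine_bump (commits : List String) (out : String) : Prop := out = determine_bump_alt commits
instance (commits : List String) (out : String) : Decidable (Spec_determine_bump commits out) := by unfold Spec_determine_bump; infer_instance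

-- ===== CLAIM (what is proved, stated in full; the proofs are below) =====
def Claim_equal_determine_bump : Prop := ∀ (commits : List String), Dom_determine_bump commits → Spec_determine_bump commits (determine_bump commits)

-- ===== LEMMAS AND PROOFS =====
-- the running maximum of pvRank equals the rank of the highest-priority flag that fires
set_option maxHeartbeats 1000000 in
theorem foldl_max_rank (l : List String) (n : Nat) :
    l.foldl (fun acc c => Nat.max acc (pvRank c)) n =
      Nat.max n
        (if l.any (fun c => pvBreaking c) then 3
         else if l.any (fun c => PySem.Str.startswith c "feat") then 2
         else if l.any (fun c => PySem.Str.startswith c "fix") then 1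
         else 0) := by
  induction l generalizing n with
  | nil => simp
  | cons c t ih =>
    simp only [List.foldl_cons, List.any_cons, ih]
    rcases Bool.eq_false_or_eq_true (pvBreaking c) with hb | hb <;>
      rcases Bool.eq_false_or_eq_true (PySem.Str.startswith c "feat") with hf | hf <;>
        rcases Bool.eq_false_or_eq_true (PySem.Str.startswith c "fix") with hx | hx <;>
          simp only [pvRank, hb, hf, hx, Bool.false_or, Bool.true_or, reduceIte] <;>
            split_ifs <;> simp only [Nat.max_def] <;> split_ifs <;>
              first | omega | exact absurd ‹false = true› Bool.false_ne_true | exact ‹False›.elim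

-- ===== VERDICT (by name: the statement is the Claim_ definition above) =====
theorem determine_bump_spec : Claim_equal_determine_bump := by
  intro commits _
  show determine_bump commits = determine_bump_alt commits
  simp only [determine_bump, determine_bump_alt, foldl_max_rank, Nat.zero_max]
  split_ifs <;> rfl
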